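-- pv_equiv track=rewrite | github.com/goreatharva/Competitive-Programming- | Codes/ProblemSet/LOL Lovers.py | find_division
-- ===== SOURCE A (Python) =====
-- def find_division(n, items):
--     loaves = items.count('L')
--     onions = items.count('O')
--
--     if loaves == 1 or onions == 1 or loaves == n or onions == n:
--         return -1
--
--     for i in range(n-1):
--         prefix = items[:i+1]
--         suffix = items[i+1:]
--         if prefix.count('L') != suffix.count('L') and prefix.count('O') != suffix.count('O'):
--             return i+1
--
--     return -1
-- ===== SOURCE B (Python) =====
-- def find_division(n, items):
--     total_l = items.count('L')
--     total_o = items.count('O')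
--
--     if total_l == 1 or total_o == 1 or total_l == n or total_o == n:
--         return -1
--
--     pl = 0
--     po = 0
--     for i in range(n - 1):
--         c = items[i]
--         if c == 'L':
--             pl += 1
--         elif c == 'O':
--             po += 1
--         if pl != total_l - pl and po != total_o - po:
--             return i + 1
--
--     return -1
-- ===== Notes on version B (the rewrite author's own statement) =====
-- stated objective: faster
-- what changed: Instead of slicing the string at every split point and re-counting 'L'/'O' in both halves, B counts the totals once and sweeps the split points in a single pass with running prefix counts, deriving the suffix counts from the totals; Pre_ restricts to the natural domain n <= len(items) (in the original problem n is the string's length), because beyond it A's slices degenerate to whole-string/empty pairs while B indexes past the string and raises.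
-- outside the precondition, e.g. on find_division(4, 'LL'): A returns -1, B raises IndexError
import Mathlib
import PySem

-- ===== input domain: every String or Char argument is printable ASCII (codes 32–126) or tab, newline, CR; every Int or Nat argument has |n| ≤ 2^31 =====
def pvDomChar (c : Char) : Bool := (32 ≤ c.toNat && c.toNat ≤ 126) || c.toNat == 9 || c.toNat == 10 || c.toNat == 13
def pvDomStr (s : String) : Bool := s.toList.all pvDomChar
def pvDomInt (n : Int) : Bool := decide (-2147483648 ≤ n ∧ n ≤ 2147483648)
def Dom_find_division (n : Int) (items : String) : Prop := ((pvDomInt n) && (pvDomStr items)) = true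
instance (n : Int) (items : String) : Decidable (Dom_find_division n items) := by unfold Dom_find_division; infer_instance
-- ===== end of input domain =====

-- B replaces A's per-split slice-and-count rescans by one pass with running prefix counts
-- (suffix counts derived from the totals): objective 'faster' (asymptotic).


-- ===== PORT A =====
-- A's for-loop with early return: i counts up through range(n-1), fuel is the number of
-- iterations left (range(n-1) never materializes, exactly as Python's range object does not).
def findDivLoopA (items : String) : Nat → Int → Int
  | 0, _ => -1
  | fuel + 1, i =>
    let pre := PySem.Str.slice items none (some (i + 1))
    let suf := PySem.Str.slice items (some (i + 1)) none
    if PySem.Str.count pre "L" ≠ PySem.Str.count suf "L" ∧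
       PySem.Str.count pre "O" ≠ PySem.Str.count suf "O" then
      i + 1
    else
      findDivLoopA items fuel (i + 1)

def find_division (n : Int) (items : String) : Int :=
  let loaves : Int := (PySem.Str.count items "L" : Int)
  let onions : Int := (PySem.Str.count items "O" : Int)
  if loaves = 1 ∨ onions = 1 ∨ loaves = n ∨ onions = n then -1
  else findDivLoopA items (n - 1).toNat 0

-- ===== PORT B =====
-- B's for-loop over range(n-1) with early return; items[i] is PySem.Str.pyGet?
-- (the 'none' branch is Python's IndexError, excluded by Pre_).
def findDivLoopB (items : String) (totL totO : Int) : Nat → Int → Int → Int → Int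
  | 0, _, _, _ => -1
  | fuel + 1, i, pl, po =>
    match PySem.Str.pyGet? items i with
    | none => -1  -- IndexError in Python; unreachable under Pre_find_division
    | some c =>
      let pl := if c = 'L' then pl + 1 else pl
      let po := if ¬(c = 'L') ∧ c = 'O' then po + 1 else po
      if pl ≠ totL - pl ∧ po ≠ totO - po then i + 1
      else findDivLoopB items totL totO fuel (i + 1) pl po

def find_division_alt (n : Int) (items : String) : Int :=
  let totL : Int := (PySem.Str.count items "L" : Int)
  let totO : Int := (PySem.Str.count items "O" : Int)
  if totL = 1 ∨ totO = 1 ∨ totL = n ∨ totO = n then -1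
  else findDivLoopB items totL totO (n - 1).toNat 0 0 0

-- ===== PRECONDITION & SPEC =====
-- Pre_ restricts to the problem's natural domain n ≤ len(items) (in the original problem n IS
-- the string's length); beyond it A's slices degenerate to whole-string/empty pairs and still
-- return, while B indexes past the string and raises IndexError.
def Pre_find_division (n : Int) (items : String) : Prop := n ≤ PySem.Str.len items
instance (n : Int) (items : String) : Decidable (Pre_find_division n items) := by unfold Pre_find_division; infer_instance
def pvWitness_find_division : Int × String := (4, "LLOO")
def Spec_find_division (n : Int) (items : String) (out : Int) : Prop := out = find_division_alt n items
instance (n : Int) (items : String) (out : Int) : Decidable (Spec_find_division n items out) := by unfold Spec_find_division; infer_instance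

-- ===== CLAIM (what is proved, stated in full; the proofs are below) =====
def Claim_equal_find_division : Prop := ∀ (n : Int) (items : String), Dom_find_division n items → Pre_find_division n items → Spec_find_division n items (find_division n items)

-- ===== LEMMAS AND PROOFS =====

-- s.count(c) for a single-character needle is List.count on the code points.
theorem chars_count_go_singleton (c : Char) (l : List Char) (fuel acc : Nat)
    (h : l.length ≤ fuel) :
    PySem.Chars.count.go [c] fuel l acc = acc + l.count c := by
  induction l generalizing fuel acc with
  | nil => cases fuel <;> simp [PySem.Chars.count.go]
  | cons x t ih =>
    cases fuel with
    | zero => simp at h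
    | succ f =>
      simp only [PySem.Chars.count.go]
      by_cases hx : c = x
      · subst hx
        simp [List.isPrefixOf, ih f (acc + 1) (by simpa using h)]
        omega
      · simp [List.isPrefixOf, hx, Ne.symm hx, ih f acc (by simpa using h)]

theorem chars_count_singleton (cs : List Char) (c : Char) :
    PySem.Chars.count cs [c] = cs.count c := by
  simpa [PySem.Chars.count] using chars_count_go_singleton c cs cs.length 0 le_rfl

theorem str_count_L (s : String) : PySem.Str.count s "L" = s.toList.count 'L' := by
  rw [PySem.Str.count_eq]; exact chars_count_singleton s.toList 'L'

theorem str_count_O (s : String) : PySem.Str.count s "O" = s.toList.count 'O' := by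
  rw [PySem.Str.count_eq]; exact chars_count_singleton s.toList 'O'

-- Main invariant: with the string split as pre ++ suf and at most |suf| iterations left,
-- A's remaining loop from index |pre| equals B's remaining loop carrying pre's running counts.
theorem loopA_eq_loopB (items : String) :
    ∀ (suf pre : List Char), items.toList = pre ++ suf →
    ∀ fuel : Nat, fuel ≤ suf.length →
    findDivLoopA items fuel (pre.length : Int) =
      findDivLoopB items (items.toList.count 'L' : Int) (items.toList.count 'O' : Int)
        fuel (pre.length : Int) (pre.count 'L' : Int) (pre.count 'O' : Int) := by
  intro suf
  induction suf with
  | nil =>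
    intro pre h fuel hf
    have hf0 : fuel = 0 := by simpa using hf
    subst hf0
    simp [findDivLoopA, findDivLoopB]
  | cons c suf' ih =>
    intro pre h fuel hf
    cases fuel with
    | zero => simp [findDivLoopA, findDivLoopB]
    | succ f =>
      simp only [findDivLoopA, findDivLoopB]
      have hget : PySem.Str.pyGet? items (pre.length : Int) = some c := by
        rw [PySem.Str.pyGet?_eq, PySem.Chars.pyGet?_eq_listPyGet?, h]
        exact PySem.List.pyGet?_append_length pre suf' c
      rw [hget]
      have e1 : (PySem.Str.slice items none (some ((pre.length : Int) + 1))).toList = pre ++ [c] := by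
        rw [PySem.Str.toList_slice, PySem.Chars.slice_eq_listSlice,
          PySem.List.slice_to _ (by omega), h,
          (show ((pre.length : Int) + 1).toNat = pre.length + 1 by omega)]
        simpa using List.take_length_add_append 1
      have e2 : (PySem.Str.slice items (some ((pre.length : Int) + 1))).toList = suf' := by
        rw [PySem.Str.toList_slice, PySem.Chars.slice_eq_listSlice,
          PySem.List.slice_from _ (by omega), h,
          (show ((pre.length : Int) + 1).toNat = pre.length + 1 by omega)]
        simp
      simp only [str_count_L, str_count_O, e1, e2]
      have hcL : (pre ++ [c]).count 'L' = pre.count 'L' + (if c = 'L' then 1 else 0) := by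
        by_cases h1 : c = 'L' <;> simp [h1, List.count_append]
      have hcO : (pre ++ [c]).count 'O' = pre.count 'O' + (if c = 'O' then 1 else 0) := by
        by_cases h1 : c = 'O' <;> simp [h1, List.count_append]
      have htL : items.toList.count 'L' =
          pre.count 'L' + (if c = 'L' then 1 else 0) + suf'.count 'L' := by
        rw [h]
        by_cases h1 : c = 'L' <;> simp [h1, List.count_append]
        omega
      have htO : items.toList.count 'O' =
          pre.count 'O' + (if c = 'O' then 1 else 0) + suf'.count 'O' := by
        rw [h]
        by_cases h1 : c = 'O' <;> simp [h1, List.count_append]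
        omega
      have haccL : ((pre ++ [c]).count 'L' : Int) =
          (if c = 'L' then (pre.count 'L' : Int) + 1 else (pre.count 'L' : Int)) := by
        rw [hcL]; by_cases h1 : c = 'L' <;> simp [h1]
      have haccO : ((pre ++ [c]).count 'O' : Int) =
          (if ¬(c = 'L') ∧ c = 'O' then (pre.count 'O' : Int) + 1 else (pre.count 'O' : Int)) := by
        rw [hcO]
        by_cases h1 : c = 'L'
        · subst h1; simp
        · by_cases h2 : c = 'O' <;> simp [h1, h2]
      have hiff : ((pre ++ [c]).count 'L' ≠ suf'.count 'L' ∧ (pre ++ [c]).count 'O' ≠ suf'.count 'O') ↔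
          ((if c = 'L' then (pre.count 'L' : Int) + 1 else (pre.count 'L' : Int)) ≠
              (items.toList.count 'L' : Int) -
                (if c = 'L' then (pre.count 'L' : Int) + 1 else (pre.count 'L' : Int)) ∧
           (if ¬(c = 'L') ∧ c = 'O' then (pre.count 'O' : Int) + 1 else (pre.count 'O' : Int)) ≠
              (items.toList.count 'O' : Int) -
                (if ¬(c = 'L') ∧ c = 'O' then (pre.count 'O' : Int) + 1 else (pre.count 'O' : Int))) := by
        rw [← haccL, ← haccO, hcL, hcO, htL, htO]
        by_cases h1 : c = 'L'
        · subst h1; simp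
          try push_cast
          try omega
        · by_cases h2 : c = 'O'
          · subst h2; simp [h1]
            try push_cast
            try omega
          · simp [h1, h2]
            try push_cast
            try omega
      by_cases hcond : ((pre ++ [c]).count 'L' ≠ suf'.count 'L' ∧ (pre ++ [c]).count 'O' ≠ suf'.count 'O')
      · rw [if_pos hcond, if_pos (hiff.mp hcond)]
      · rw [if_neg hcond, if_neg (fun hb => hcond (hiff.mpr hb))]
        have h' : items.toList = (pre ++ [c]) ++ suf' := by rw [h]; simp
        have hrec := ih (pre ++ [c]) h' f (by simpa using Nat.lt_succ_iff.mp (by simpa using hf))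
        simp only [List.length_append, List.length_cons, List.length_nil, Nat.cast_add,
          Nat.cast_one, Nat.zero_add] at hrec
        rw [haccL, haccO] at hrec
        simpa using hrec

-- ===== VERDICT (by name: the statement is the Claim_ definition above) =====
theorem find_division_spec : Claim_equal_find_division := by
  intro n items _ hpre
  unfold Spec_find_division find_division find_division_alt
  simp only [str_count_L, str_count_O]
  by_cases hg : ((items.toList.count 'L' : Int) = 1 ∨ (items.toList.count 'O' : Int) = 1 ∨
      (items.toList.count 'L' : Int) = n ∨ (items.toList.count 'O' : Int) = n)
  · rw [if_pos hg, if_pos hg]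
  · rw [if_neg hg, if_neg hg]
    have hlen : n ≤ (items.toList.length : Int) := by
      simpa [PySem.Str.len_eq] using hpre
    have := loopA_eq_loopB items items.toList [] (by simp) (n - 1).toNat (by omega)
    simpa using this
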